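-- pv_equiv track=rewrite | github.com/tt1703044-coder/A-Visualization-Framework-for-Sequence-Predictions | SankeyX_with_intent_dynamics.py | check_intent1
-- ===== SOURCE A (Python) =====
-- def check_intent1(trace):
--     if "browse" not in trace: return None
--     for i, e in enumerate(trace):
--         if e == "browse":
--             window = trace[i+1:i+6]
--             if any(x in window for x in ["detail", "add"]): continue
--             return True
--     return False if "browse" in trace else None
-- ===== SOURCE B (Python) =====
-- def check_intent1(trace):
--     # Single reverse pass: maintain distance to the nearest detail/add
--     # at or after the current position, instead of slicing a window per browse.
--     saw_browse = False
--     unfollowed = False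
--     dist = None  # distance from current element to nearest detail/add at/after it
--     for e in reversed(trace):
--         if dist is not None:
--             dist += 1
--         if e == "detail" or e == "add":
--             dist = 0
--         elif e == "browse":
--             saw_browse = True
--             if dist is None or dist > 5:
--                 unfollowed = True
--     if not saw_browse:
--         return None
--     return unfollowed
-- ===== Notes on version B (the rewrite author's own statement) =====
-- stated objective: alternative
-- what changed: Replaces the forward scan that slices a fresh 5-element window for every 'browse' with a single reverse pass maintaining the distance to the nearest following 'detail'/'add' as running state.
import Mathlib
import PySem

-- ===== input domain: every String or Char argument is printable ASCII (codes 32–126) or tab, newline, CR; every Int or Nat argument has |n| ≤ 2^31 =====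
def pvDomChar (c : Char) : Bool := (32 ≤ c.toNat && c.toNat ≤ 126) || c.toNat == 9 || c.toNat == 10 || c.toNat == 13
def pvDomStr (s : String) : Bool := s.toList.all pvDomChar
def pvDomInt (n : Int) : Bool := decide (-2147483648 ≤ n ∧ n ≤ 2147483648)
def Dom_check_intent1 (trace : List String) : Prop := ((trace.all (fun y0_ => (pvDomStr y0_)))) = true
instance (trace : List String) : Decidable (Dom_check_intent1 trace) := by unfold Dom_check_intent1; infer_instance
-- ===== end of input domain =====

-- B replaces A's per-'browse' window slicing by one reverse pass that maintains the
-- distance to the nearest following 'detail'/'add' (objective: alternative single-pass algorithm).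

-- ===== PORT A =====
-- any(x in window for x in ["detail", "add"])
def pvAWindowHit (window : List String) : Bool :=
  (["detail", "add"]).any (fun x => window.contains x)

-- the 'for i, e in enumerate(trace)' loop; slices trace[i+1:i+6] per browse
def pvALoop (trace : List String) : List (Int × String) → Option Bool
  | [] => if trace.contains "browse" then some false else none
  | (i, e) :: rest =>
    if e = "browse" then
      let window := PySem.List.slice trace (some (i + 1)) (some (i + 6))
      if pvAWindowHit window then pvALoop trace rest
      else some true
    else pvALoop trace rest

def check_intent1 (trace : List String) : Option Bool :=
  if ¬ trace.contains "browse" then none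
  else pvALoop trace (PySem.List.enumerate trace 0)

-- ===== PORT B =====
-- state = (dist to nearest detail/add at/after here, saw_browse, unfollowed);
-- the Python 'for e in reversed(trace)' loop is the right fold below.
def pvBStep (e : String) (s : Option Int × Bool × Bool) : Option Int × Bool × Bool :=
  let dist := s.1.map (· + 1)
  if e = "detail" ∨ e = "add" then (some 0, s.2.1, s.2.2)
  else if e = "browse" then
    (dist, true, s.2.2 || (match dist with | none => true | some d => decide (d > 5)))
  else (dist, s.2.1, s.2.2)

def check_intent1_alt (trace : List String) : Option Bool :=
  let r := trace.foldr pvBStep (none, false, false)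
  if r.2.1 then some r.2.2 else none

-- ===== PRECONDITION & SPEC =====
def Spec_check_intent1 (trace : List String) (out : Option Bool) : Prop := out = check_intent1_alt trace
instance (trace : List String) (out : Option Bool) : Decidable (Spec_check_intent1 trace out) := by unfold Spec_check_intent1; infer_instance

-- ===== CLAIM (what is proved, stated in full; the proofs are below) =====
def Claim_equal_check_intent1 : Prop := ∀ (trace : List String), Dom_check_intent1 trace → Spec_check_intent1 trace (check_intent1 trace)

-- ===== LEMMAS AND PROOFS =====

-- index of the first 'detail'/'add', as a Nat
def pvFirstDa : List String → Option Nat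
  | [] => none
  | e :: rest => if e = "detail" ∨ e = "add" then some 0 else (pvFirstDa rest).map (· + 1)

-- whether some 'browse' lacks a 'detail'/'add' among the next 5 elements
def pvBad : List String → Bool
  | [] => false
  | e :: rest => (decide (e = "browse") && !(pvAWindowHit (rest.take 5))) || pvBad rest

lemma pvHit_take (l : List String) (n : Nat) :
    pvAWindowHit (l.take n) =
      (match pvFirstDa l with | none => false | some d => decide (d < n)) := by
  induction l generalizing n with
  | nil => cases n <;> simp [pvAWindowHit, pvFirstDa]
  | cons e rest ih =>
    cases n with
    | zero =>
      simp only [List.take_zero, pvFirstDa]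
      by_cases h : e = "detail" ∨ e = "add"
      · simp [pvAWindowHit, h]
      · simp only [if_neg h]
        cases pvFirstDa rest <;> simp [pvAWindowHit]
    | succ n =>
      simp only [List.take_succ_cons, pvFirstDa]
      by_cases h : e = "detail" ∨ e = "add"
      · rcases h with h | h <;> simp [pvAWindowHit, h]
      · have h1 : e ≠ "detail" := fun hh => h (Or.inl hh)
        have h2 : e ≠ "add" := fun hh => h (Or.inr hh)
        have he : pvAWindowHit (e :: rest.take n) = pvAWindowHit (rest.take n) := by
          simp [pvAWindowHit, Ne.symm h1, Ne.symm h2]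
        rw [he, ih, if_neg h]
        cases pvFirstDa rest <;> simp

lemma pvB_inv (l : List String) :
    l.foldr pvBStep (none, false, false) =
      ((pvFirstDa l).map (fun d => (d : Int)), l.contains "browse", pvBad l) := by
  induction l with
  | nil => simp [pvFirstDa, pvBad]
  | cons e rest ih =>
    rw [List.foldr_cons, ih]
    by_cases h : e = "detail" ∨ e = "add"
    · have hne : ("browse" : String) ≠ e := by rcases h with h | h <;> simp [h]
      have hne' : e ≠ "browse" := fun hh => hne hh.symm
      simp [pvBStep, pvFirstDa, pvBad, h, hne, hne']
    · by_cases hb : e = "browse"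
      · subst hb
        cases hfd : pvFirstDa rest with
        | none =>
          have hw : pvAWindowHit (rest.take 5) = false := by rw [pvHit_take, hfd]
          simp [pvBStep, pvFirstDa, pvBad, hfd, hw, Bool.or_comm]
        | some d =>
          have hw : pvAWindowHit (rest.take 5) = decide (d < 5) := by rw [pvHit_take, hfd]
          simp [pvBStep, pvFirstDa, pvBad, hfd, hw, Bool.or_comm]
          have h6 : decide (5 ≤ d) = !decide (d < 5) := by
            by_cases h' : d < 5 <;> simp [h'] <;> · omega
          cases pvBad rest <;> · simp [h6]
      · have hne : ("browse" : String) ≠ e := fun hh => hb hh.symm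
        cases hfd : pvFirstDa rest <;>
          simp [pvBStep, pvFirstDa, pvBad, h, hb, hne, hfd]

lemma pvALoop_eq (trace : List String) :
    ∀ (suffix : List String) (k : Nat), suffix = trace.drop k →
      pvALoop trace (PySem.List.enumerate suffix (k : Int)) =
        (if pvBad suffix then some true
         else if trace.contains "browse" then some false else none) := by
  intro suffix
  induction suffix with
  | nil => intro k _; simp [PySem.List.enumerate_nil, pvALoop, pvBad]
  | cons e rest ih =>
    intro k hk
    have hdrop : rest = trace.drop (k + 1) := by
      have := congrArg List.tail hk
      simpa [List.tail_drop] using this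
    rw [PySem.List.enumerate_cons]
    by_cases hb : e = "browse"
    · have hslice : PySem.List.slice trace (some ((k : Int) + 1)) (some ((k : Int) + 6)) =
          (trace.drop (k + 1)).take 5 := by
        have : ((k : Int) + 1) = ((k + 1 : Nat) : Int) := by push_cast; ring
        have h6 : ((k : Int) + 6) = (((k + 1 : Nat) : Int) + ((5 : Nat) : Int)) := by push_cast; ring
        rw [this, h6, PySem.List.slice_natCast_add]
      simp only [pvALoop, if_pos hb, hslice, ← hdrop]
      by_cases hw : pvAWindowHit (rest.take 5)
      · rw [if_pos hw]
        have : ((k : Int) + 1) = ((k + 1 : Nat) : Int) := by push_cast; ring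
        rw [this, ih (k + 1) hdrop]
        simp [pvBad, hb, hw]
      · rw [if_neg hw]
        simp [pvBad, hb, hw]
    · simp only [pvALoop, if_neg hb]
      have : ((k : Int) + 1) = ((k + 1 : Nat) : Int) := by push_cast; ring
      rw [this, ih (k + 1) hdrop]
      simp [pvBad, hb]

-- ===== VERDICT (by name: the statement is the Claim_ definition above) =====
theorem check_intent1_spec : Claim_equal_check_intent1 := by
  intro trace _
  unfold Spec_check_intent1 check_intent1 check_intent1_alt
  rw [pvB_inv]
  have h0 := pvALoop_eq trace trace 0 rfl
  simp only [Nat.cast_zero] at h0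
  by_cases hc : trace.contains "browse" = true
  · have hm : "browse" ∈ trace := by simpa using hc
    rw [if_neg (by simp [hm]), h0, if_pos hc]
    by_cases hbad : pvBad trace = true <;> simp [hbad, hm]
  · have hm : "browse" ∉ trace := by simpa using hc
    simp [hm]
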